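-- pv_equiv track=rewrite | github.com/kilbouri/advent-of-code | 2020/Day 07/Day 7 Part 1.py | findBags
-- ===== SOURCE A (Python) =====
-- def findBags(lookFor: set, colors: dict):
--
-- 	hasMyBag = set(lookFor)
-- 	initialLen = len(hasMyBag)
--
-- 	for key in colors.keys():
-- 		for color in lookFor:
-- 			if color in colors[key]:
-- 				hasMyBag.add(key)
--
-- 	afterLen = len(hasMyBag)
-- 	if (afterLen - initialLen == 0):
-- 		return hasMyBag
-- 	else:
-- 		return findBags(hasMyBag, colors)
-- ===== SOURCE B (Python) =====
-- def findBags(lookFor: set, colors: dict):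
--     seen = set(lookFor)
--     frontier = set(lookFor)
--     while frontier:
--         nxt = set()
--         for key, contents in colors.items():
--             if key not in seen and any(c in frontier for c in contents):
--                 nxt.add(key)
--         seen |= nxt
--         frontier = nxt
--     return seen
-- ===== Notes on version B (the rewrite author's own statement) =====
-- stated objective: faster
-- what changed: Replaced A's recursive whole-set fixed-point iteration (each pass re-tests every key's contents against the entire accumulated set with list scans) by an iterative BFS-style worklist loop that keeps a frontier of newly added bags, skips already-seen keys, and tests each key's contents only against the current frontier with O(1) set lookups.
import Mathlib
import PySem

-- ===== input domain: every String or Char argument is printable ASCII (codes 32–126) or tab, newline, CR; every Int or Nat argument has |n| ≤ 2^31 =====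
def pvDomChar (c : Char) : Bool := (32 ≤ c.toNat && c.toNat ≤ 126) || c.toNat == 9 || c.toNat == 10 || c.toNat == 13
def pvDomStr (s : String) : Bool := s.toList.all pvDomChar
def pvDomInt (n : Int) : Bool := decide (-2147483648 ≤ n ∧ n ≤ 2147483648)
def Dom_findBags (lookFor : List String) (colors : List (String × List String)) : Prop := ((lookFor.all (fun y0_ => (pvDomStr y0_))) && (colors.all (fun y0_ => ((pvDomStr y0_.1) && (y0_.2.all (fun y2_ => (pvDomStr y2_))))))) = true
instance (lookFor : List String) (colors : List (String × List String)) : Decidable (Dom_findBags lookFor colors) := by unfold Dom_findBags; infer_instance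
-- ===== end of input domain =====

-- B replaces A's whole-set fixed-point recursion by a frontier-based (BFS-level) while loop: alternative/faster.
-- Lemmas before the ports are exactly those the ports cite by name in their decreasing_by blocks.

-- ===== PORT A ===== (helper lemmas needed for termination of the port, cited in decreasing_by)

-- the inner 'for color in lookFor' loop adds `key` iff some color of the set is in colors[key]
theorem pvInnerEq (s : List String) (p : String → Bool) (k : String) (h : List String) :
    s.foldl (fun h' c => if p c then PySem.Set.add h' k else h') h
      = if s.any p then PySem.Set.add h k else h := by
  induction s generalizing h with
  | nil => simp
  | cons c cs ih =>
    by_cases hp : p c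
    · simp only [List.foldl_cons, hp, if_true, ih, List.any_cons, Bool.true_or]
      split
      · rw [PySem.Set.add_of_mem (by rw [PySem.Set.mem_add]; right; rfl)]
      · rfl
    · simp [List.foldl_cons, hp, ih]

theorem pvStepPrefix (keys : List String) (hit : String → Bool) (h : List String) :
    h <+: keys.foldl (fun h k => if hit k then PySem.Set.add h k else h) h := by
  induction keys generalizing h with
  | nil => exact List.prefix_refl _
  | cons k ks ih =>
    refine List.IsPrefix.trans ?_ (ih (if hit k then PySem.Set.add h k else h))
    split
    · rw [PySem.Set.add_eq_ite]; split
      · exact List.prefix_refl _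
      · exact List.prefix_append _ _
    · exact List.prefix_refl _

theorem pvStepNodup (keys : List String) (hit : String → Bool) (h : List String) (hh : h.Nodup) :
    (keys.foldl (fun h k => if hit k then PySem.Set.add h k else h) h).Nodup := by
  induction keys generalizing h with
  | nil => exact hh
  | cons k ks ih =>
    refine ih _ ?_
    by_cases hk : hit k
    · simp only [hk, if_true]; exact PySem.Set.nodup_add _ _ hh
    · simp only [hk, if_false]; exact hh

theorem pvStepMem (keys : List String) (hit : String → Bool) (h : List String) (x : String)
    (hx : x ∈ keys.foldl (fun h k => if hit k then PySem.Set.add h k else h) h) :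
    x ∈ h ∨ x ∈ keys := by
  induction keys generalizing h with
  | nil => exact Or.inl hx
  | cons k ks ih =>
    rcases ih _ hx with hm | hm
    · by_cases hk : hit k
      · simp only [hk, if_true] at hm
        rw [PySem.Set.mem_add] at hm
        rcases hm with hm | hm
        · exact Or.inl hm
        · exact Or.inr (by simp [hm])
      · simp only [hk, if_false] at hm; exact Or.inl hm
    · exact Or.inr (List.mem_cons_of_mem _ hm)

theorem pvCountLe (keys S S' : List String) (hsub : ∀ x ∈ S, x ∈ S') :
    (keys.filter (fun k => !decide (k ∈ S'))).length ≤ (keys.filter (fun k => !decide (k ∈ S))).length := by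
  induction keys with
  | nil => simp
  | cons a ks ih =>
    by_cases ha' : a ∈ S'
    · by_cases ha : a ∈ S <;> simp [List.filter_cons, ha, ha'] <;> omega
    · have ha : a ∉ S := fun hmem => ha' (hsub a hmem)
      simp [List.filter_cons, ha, ha']
      omega

theorem pvCountLt (keys S S' : List String) (hsub : ∀ x ∈ S, x ∈ S')
    (k : String) (hk : k ∈ keys) (hkS : k ∉ S) (hkS' : k ∈ S') :
    (keys.filter (fun k => !decide (k ∈ S'))).length < (keys.filter (fun k => !decide (k ∈ S))).length := by
  induction keys with
  | nil => exact absurd hk (List.not_mem_nil)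
  | cons a ks ih =>
    rcases List.mem_cons.mp hk with rfl | hk'
    · have hle := pvCountLe ks S S' hsub
      simp [List.filter_cons, hkS, hkS']
      omega
    · have hlt := ih hk'
      by_cases ha' : a ∈ S'
      · by_cases ha : a ∈ S <;> simp [List.filter_cons, ha, ha'] <;> omega
      · have ha : a ∉ S := fun hmem => ha' (hsub a hmem)
        simp [List.filter_cons, ha, ha']
        omega

-- hasMyBag = set(lookFor); for key in colors.keys(): for color in lookFor: if color in colors[key]: hasMyBag.add(key)
def pvRoundA (s : List String) (d : PySem.Dict String (List String)) : List String :=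
  d.keys.foldl
    (fun h key => s.foldl (fun h' c => if (d.getD key []).contains c then PySem.Set.add h' key else h') h)
    (PySem.Set.ofList s)

theorem pvRoundA_eq_step (s : List String) (d : PySem.Dict String (List String)) :
    pvRoundA s d
      = d.keys.foldl
          (fun h k => if s.any (fun c => (d.getD k []).contains c) then PySem.Set.add h k else h)
          (PySem.Set.ofList s) := by
  unfold pvRoundA
  congr 1
  funext h k
  exact pvInnerEq s _ k h

theorem pvRoundA_dec (s : List String) (d : PySem.Dict String (List String))
    (hne : ¬((pvRoundA s d).length - (PySem.Set.ofList s).length = 0)) :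
    (d.keys.filter (fun k => !((PySem.Set.ofList (pvRoundA s d)).contains k))).length
      < (d.keys.filter (fun k => !((PySem.Set.ofList s).contains k))).length := by
  rw [pvRoundA_eq_step] at hne ⊢
  set h0 := PySem.Set.ofList s with hh0
  set r := d.keys.foldl
      (fun h k => if s.any (fun c => (d.getD k []).contains c) then PySem.Set.add h k else h) h0 with hr
  have hpre : h0 <+: r := pvStepPrefix _ _ _
  have hnd : r.Nodup := pvStepNodup _ _ _ (PySem.Set.nodup_ofList s)
  obtain ⟨t, ht⟩ := hpre
  have htne : t ≠ [] := by
    intro h; rw [h, List.append_nil] at ht; rw [← ht] at hne; omega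
  obtain ⟨k0, t', rfl⟩ := List.exists_cons_of_ne_nil htne
  have hk0r : k0 ∈ r := by rw [← ht]; simp
  have hk0h0 : k0 ∉ h0 := by
    rw [← ht] at hnd
    have := (List.nodup_append.mp hnd).2.2
    intro hmem
    exact this k0 hmem k0 (by simp) rfl
  have hk0keys : k0 ∈ d.keys := by
    rcases pvStepMem _ _ _ _ hk0r with hm | hm
    · exact absurd hm hk0h0
    · exact hm
  rw [PySem.Set.ofList_eq_self_of_nodup r hnd]
  have hsub : ∀ x ∈ h0, x ∈ r := fun x hx => ht ▸ List.mem_append_left _ hx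
  simpa using pvCountLt d.keys h0 r hsub k0 hk0keys hk0h0 hk0r

-- literal transliteration of A's recursion (lookFor arrives as a Python set: its distinct elements)
def findBagsGo (s : List String) (d : PySem.Dict String (List String)) : List String :=
  let hasMyBag := pvRoundA s d
  if hasMyBag.length - (PySem.Set.ofList s).length = 0 then hasMyBag
  else findBagsGo hasMyBag d
termination_by (d.keys.filter (fun k => !((PySem.Set.ofList s).contains k))).length
decreasing_by exact pvRoundA_dec s d (by assumption)

def findBags (lookFor : List String) (colors : List (String × List String)) : List String :=
  findBagsGo (PySem.Set.ofList lookFor) (PySem.Dict.ofList colors)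

-- ===== PORT B ===== (helper lemmas needed for termination of the port, cited in decreasing_by)

-- nxt = set(); for key, contents in colors.items(): if key not in seen and any(c in frontier for c in contents): nxt.add(key)
def pvNext (seen frontier : List String) (d : PySem.Dict String (List String)) : List String :=
  d.items.foldl
    (fun nxt kv =>
      if !(PySem.Set.contains seen kv.1) && kv.2.any (fun c => PySem.Set.contains frontier c)
      then PySem.Set.add nxt kv.1 else nxt)
    PySem.Set.empty

theorem pvItemsFoldMem (l : List (String × List String)) (p : String × List String → Bool)
    (a0 : List String) (x : String)
    (hx : x ∈ l.foldl (fun a kv => if p kv then PySem.Set.add a kv.1 else a) a0) :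
    x ∈ a0 ∨ ∃ kv ∈ l, x = kv.1 ∧ p kv = true := by
  induction l generalizing a0 with
  | nil => exact Or.inl hx
  | cons kv l ih =>
    rcases ih _ hx with hm | ⟨kv', hkv', rfl, hp⟩
    · by_cases hp : p kv
      · simp only [hp, if_true] at hm
        rw [PySem.Set.mem_add] at hm
        rcases hm with hm | rfl
        · exact Or.inl hm
        · exact Or.inr ⟨kv, by simp, rfl, hp⟩
      · simp only [hp, if_false] at hm; exact Or.inl hm
    · exact Or.inr ⟨kv', List.mem_cons_of_mem _ hkv', rfl, hp⟩

theorem pvNext_mem (seen frontier : List String) (d : PySem.Dict String (List String)) (x : String)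
    (hx : x ∈ pvNext seen frontier d) : x ∈ d.keys ∧ x ∉ seen := by
  rcases pvItemsFoldMem _ _ _ _ hx with hm | ⟨kv, hkv, rfl, hp⟩
  · simp [PySem.Set.empty] at hm
  · constructor
    · simp only [PySem.Dict.keys]; exact List.mem_map.mpr ⟨kv, hkv, rfl⟩
    · intro hmem
      simp [PySem.Set.contains_eq_listContains] at hp
      exact hp.1 hmem

theorem pvUnionNil (s : List String) : PySem.Set.union s [] = s := by
  unfold PySem.Set.union PySem.Set.update; rfl

theorem pvBfsDec (seen frontier : List String) (d : PySem.Dict String (List String))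
    (hf : ¬(frontier.isEmpty = true)) :
    2 * (d.keys.filter (fun k => !((PySem.Set.union seen (pvNext seen frontier d)).contains k))).length
        + (if (pvNext seen frontier d).isEmpty then 0 else 1)
      < 2 * (d.keys.filter (fun k => !(seen.contains k))).length + (if frontier.isEmpty then 0 else 1) := by
  simp only [hf, if_false]
  rcases hN : pvNext seen frontier d with _ | ⟨k0, t⟩
  · rw [pvUnionNil]; simp
  · have hk0 : k0 ∈ pvNext seen frontier d := by rw [hN]; simp
    obtain ⟨hkeys, hseen⟩ := pvNext_mem _ _ _ _ hk0
    have hk0' : k0 ∈ (k0 :: t : List String) := by simp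
    have hsub : ∀ x ∈ seen, x ∈ PySem.Set.union seen (k0 :: t) :=
      fun x hx => (PySem.Set.mem_union _ _ x).mpr (Or.inl hx)
    have hk0u : k0 ∈ PySem.Set.union seen (k0 :: t) :=
      (PySem.Set.mem_union _ _ k0).mpr (Or.inr hk0')
    have hlt := pvCountLt d.keys seen (PySem.Set.union seen (k0 :: t)) hsub k0 hkeys hseen hk0u
    simp only [List.isEmpty_cons, Bool.false_eq_true, if_false]
    simp [List.contains_eq_mem]
    simp [List.contains_eq_mem] at hlt
    omega

-- seen = set(lookFor); frontier = set(lookFor); while frontier: nxt = …; seen |= nxt; frontier = nxt; return seen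
def bfsGo (seen frontier : List String) (d : PySem.Dict String (List String)) : List String :=
  if frontier.isEmpty then seen
  else
    let nxt := pvNext seen frontier d
    bfsGo (PySem.Set.union seen nxt) nxt d
termination_by 2 * (d.keys.filter (fun k => !(seen.contains k))).length + (if frontier.isEmpty then 0 else 1)
decreasing_by exact pvBfsDec seen frontier d (by assumption)

def findBags_alt (lookFor : List String) (colors : List (String × List String)) : List String :=
  bfsGo (PySem.Set.ofList lookFor) (PySem.Set.ofList lookFor) (PySem.Dict.ofList colors)

-- ===== PRECONDITION & SPEC =====
def Spec_findBags (lookFor : List String) (colors : List (String × List String)) (out : List String) : Prop := out = findBags_alt lookFor colors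
instance (lookFor : List String) (colors : List (String × List String)) (out : List String) : Decidable (Spec_findBags lookFor colors out) := by unfold Spec_findBags; infer_instance

-- ===== CLAIM (what is proved, stated in full; the proofs are below) =====
def Claim_equal_findBags : Prop := ∀ (lookFor : List String) (colors : List (String × List String)), Dom_findBags lookFor colors → Spec_findBags lookFor colors (findBags lookFor colors)

-- ===== LEMMAS AND PROOFS =====

theorem pvStepFilter (keys : List String) (hit : String → Bool) (hk : keys.Nodup) :
    ∀ h : List String, h.Nodup →
    keys.foldl (fun h k => if hit k then PySem.Set.add h k else h) h
      = h ++ keys.filter (fun k => hit k && !(h.contains k)) := by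
  induction keys with
  | nil => intro h _; simp
  | cons k ks ih =>
    intro h hh
    obtain ⟨hkks, hks⟩ := List.nodup_cons.mp hk
    simp only [List.foldl_cons]
    by_cases hhit : hit k
    · by_cases hmem : k ∈ h
      · rw [if_pos hhit, PySem.Set.add_of_mem hmem, ih hks h hh]
        simp [List.filter_cons, hhit, List.contains_eq_mem, hmem]
      · rw [if_pos hhit, PySem.Set.add_of_not_mem hmem,
            ih hks (h ++ [k]) (by simp [List.nodup_append, hh]; exact fun a ha hak => hmem (hak ▸ ha))]
        have hfeq : ks.filter (fun x => hit x && !((h ++ [k]).contains x))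
            = ks.filter (fun x => hit x && !(h.contains x)) := by
          apply List.filter_congr
          intro x hx
          have hxk : x ≠ k := fun hxy => hkks (hxy ▸ hx)
          simp [List.contains_eq_mem, hxk]
        rw [hfeq]
        simp [List.filter_cons, hhit, List.contains_eq_mem, hmem]
    · rw [if_neg hhit, ih hks h hh]
      simp [List.filter_cons, hhit]

theorem pvRoundA_char (s : List String) (d : PySem.Dict String (List String))
    (hs : s.Nodup) (hk : d.keys.Nodup) :
    pvRoundA s d
      = s ++ d.keys.filter (fun k => s.any (fun c => (d.getD k []).contains c) && !(s.contains k)) := by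
  rw [pvRoundA_eq_step, PySem.Set.ofList_eq_self_of_nodup s hs]
  exact pvStepFilter d.keys _ hk s hs

theorem pvItemsFoldChar (l : List (String × List String)) (p : String × List String → Bool) :
    ∀ a0 : List String, (l.map Prod.fst).Nodup → a0.Nodup → (∀ kv ∈ l, kv.1 ∉ a0) →
    l.foldl (fun a kv => if p kv then PySem.Set.add a kv.1 else a) a0
      = a0 ++ (l.filter p).map Prod.fst := by
  induction l with
  | nil => intro a0 _ _ _; simp
  | cons kv l ih =>
    intro a0 hl ha0 hdisj
    obtain ⟨hkvl, hl'⟩ := List.nodup_cons.mp hl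
    simp only [List.foldl_cons]
    by_cases hp : p kv
    · rw [if_pos hp, PySem.Set.add_of_not_mem (hdisj kv (by simp)),
          ih (a0 ++ [kv.1]) hl' (by simp [List.nodup_append, ha0]; exact fun a ha hak => hdisj kv (by simp) (hak ▸ ha)) ?_]
      · simp [List.filter_cons, hp]
      · intro kv' hkv'
        have h1 : kv'.1 ∉ a0 := hdisj kv' (List.mem_cons_of_mem _ hkv')
        have h2 : kv'.1 ≠ kv.1 := fun he => hkvl (he ▸ List.mem_map.mpr ⟨kv', hkv', rfl⟩)
        simp [h1, h2]
    · rw [if_neg hp, ih a0 hl' ha0 (fun kv' hkv' => hdisj kv' (List.mem_cons_of_mem _ hkv'))]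
      simp [List.filter_cons, hp]

theorem pvMapFilter (l : List (String × List String)) (p : String × List String → Bool)
    (q : String → Bool) (hpq : ∀ kv, p kv = q kv.1) :
    (l.filter p).map Prod.fst = (l.map Prod.fst).filter q := by
  induction l with
  | nil => simp
  | cons kv l ih =>
    by_cases h : q kv.1 <;> simp [List.filter_cons, hpq, h, ih]

theorem pvNext_char (seen frontier : List String) (d : PySem.Dict String (List String))
    (hk : d.keys.Nodup) :
    pvNext seen frontier d
      = d.keys.filter (fun k => !(seen.contains k) && (d.getD k []).any (fun c => frontier.contains c)) := by
  have hkeys : d.keys = d.items.map Prod.fst := rfl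
  have hk' : (d.items.map Prod.fst).Nodup := hkeys ▸ hk
  unfold pvNext
  rw [pvItemsFoldChar d.items _ PySem.Set.empty hk' (by simp [PySem.Set.empty])
        (by intro kv _; simp [PySem.Set.empty])]
  have hcongr : d.items.filter
        (fun kv => !(PySem.Set.contains seen kv.1) && kv.2.any (fun c => PySem.Set.contains frontier c))
      = d.items.filter
        (fun kv => !(seen.contains kv.1) && (d.getD kv.1 []).any (fun c => frontier.contains c)) := by
    apply List.filter_congr
    intro kv hkv
    rw [PySem.Dict.getD_of_mem_items d (by exact (Prod.mk.eta ▸ hkv : (kv.1, kv.2) ∈ d.items)) hk []]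
    simp [PySem.Set.contains_eq_listContains]
  rw [hcongr, hkeys]
  simpa [PySem.Set.empty] using pvMapFilter d.items _
    (fun x => !(seen.contains x) && (d.getD x []).any (fun c => frontier.contains c)) (fun kv => rfl)

theorem pvUnionEq (s t : List String) : PySem.Set.union s t = PySem.Set.update s t := rfl

theorem pvAeqB (d : PySem.Dict String (List String)) (S F : List String)
    (hS : S.Nodup) (hk : d.keys.Nodup) (hF : ∀ x ∈ F, x ∈ S)
    (hsat : ∀ k ∈ d.keys, ∀ c ∈ d.getD k [], c ∈ S → c ∉ F → k ∈ S) :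
    findBagsGo S d = bfsGo S F d := by
  have hround := pvRoundA_char S d hS hk
  have hnext := pvNext_char S F d hk
  have hfeq : d.keys.filter (fun k => S.any (fun c => (d.getD k []).contains c) && !(S.contains k))
      = d.keys.filter (fun k => !(S.contains k) && (d.getD k []).any (fun c => F.contains c)) := by
    apply List.filter_congr
    intro k hkmem
    by_cases hkS : k ∈ S
    · simp [List.contains_eq_mem, hkS]
    · have h1 : S.contains k = false := by simp [List.contains_eq_mem, hkS]
      simp only [h1, Bool.not_false, Bool.and_true, Bool.true_and]
      rw [Bool.eq_iff_iff]
      simp only [List.any_eq_true, List.contains_iff_mem]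
      constructor
      · rintro ⟨c, hcS, hcg⟩
        by_cases hcF : c ∈ F
        · exact ⟨c, hcg, hcF⟩
        · exact absurd (hsat k hkmem c hcg hcS hcF) hkS
      · rintro ⟨c, hcg, hcF⟩
        exact ⟨c, hF c hcF, hcg⟩
  set N := d.keys.filter (fun k => !(S.contains k) && (d.getD k []).any (fun c => F.contains c)) with hNdef
  have hroundN : pvRoundA S d = S ++ N := by rw [hround, hfeq]
  have hNnodup : N.Nodup := List.Nodup.filter _ hk
  have hNS : ∀ x ∈ N, x ∉ S := by
    intro x hx
    have := (List.mem_filter.mp hx).2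
    intro hmem
    simp [List.contains_eq_mem, hmem] at this
  have hofS : PySem.Set.ofList S = S := PySem.Set.ofList_eq_self_of_nodup S hS
  rw [findBagsGo, bfsGo]
  simp only [hroundN, hnext, hofS]
  by_cases hFe : F.isEmpty
  · have hF0 : F = [] := List.isEmpty_iff.mp hFe
    have hN0 : N = [] := by
      rw [hNdef, hF0]
      apply List.filter_eq_nil_iff.mpr
      intro k _
      simp
    simp [hFe, hN0]
  · simp only [hFe, if_false]
    by_cases hN0 : N = []
    · rw [hN0]
      rw [bfsGo]
      simp [pvUnionNil, hN0]
    · have hlen : ¬((S ++ N).length - S.length = 0) := by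
        simp only [List.length_append]
        have : N.length ≠ 0 := fun h => hN0 (List.eq_nil_of_length_eq_zero h)
        omega
      have hunion : PySem.Set.union S N = S ++ N := by
        rw [pvUnionEq]
        exact PySem.Set.update_eq_append_of_disjoint S N hNnodup hNS
      rw [if_neg hlen, hunion]
      have hS' : (S ++ N).Nodup := by
        rw [List.nodup_append]
        refine ⟨hS, hNnodup, ?_⟩
        intro a ha b hb hab
        exact hNS b hb (hab ▸ ha)
      have hF' : ∀ x ∈ N, x ∈ S ++ N := fun x hx => List.mem_append_right _ hx
      have hsat' : ∀ k ∈ d.keys, ∀ c ∈ d.getD k [], c ∈ S ++ N → c ∉ N → k ∈ S ++ N := by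
        intro k hkmem c hcg hcSN hcN
        have hcS : c ∈ S := by
          rcases List.mem_append.mp hcSN with h | h
          · exact h
          · exact absurd h hcN
        by_cases hcF : c ∈ F
        · by_cases hkS : k ∈ S
          · exact List.mem_append_left _ hkS
          · refine List.mem_append_right _ ?_
            rw [hNdef]
            refine List.mem_filter.mpr ⟨hkmem, ?_⟩
            have h1 : S.contains k = false := by simp [List.contains_eq_mem, hkS]
            simp only [h1, Bool.not_false, Bool.true_and, List.any_eq_true, List.contains_iff_mem]
            exact ⟨c, hcg, hcF⟩
        · exact List.mem_append_left _ (hsat k hkmem c hcg hcS hcF)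
      exact pvAeqB d (S ++ N) N hS' hk hF' hsat'
termination_by (d.keys.filter (fun k => !decide (k ∈ S))).length
decreasing_by
  obtain ⟨k0, hk0N⟩ := List.exists_mem_of_ne_nil N hN0
  exact pvCountLt d.keys S (S ++ N) (fun x hx => List.mem_append_left _ hx) k0
    (List.mem_filter.mp hk0N).1 (hNS k0 hk0N) (List.mem_append_right _ hk0N)

-- ===== VERDICT (by name: the statement is the Claim_ definition above) =====
theorem findBags_spec : Claim_equal_findBags := by
  intro lookFor colors _
  unfold Spec_findBags findBags findBags_alt
  apply pvAeqB
  · exact PySem.Set.nodup_ofList lookFor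
  · exact PySem.Dict.nodup_keys_ofList colors
  · exact fun x hx => hx
  · exact fun k _ c _ hcS hcF => absurd hcS hcF
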